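-- pv_equiv track=rewrite | github.com/theypsilon-test/ua2 | src/update_all/ui_model_utilities.py | _extract_variables_from_text
-- ===== SOURCE A (Python) =====
-- from typing import Set
--
-- def _extract_variables_from_text(text: str) -> Set[str]:
--     result = set()
--
--     reading_state = 0
--     reading_value = ''
--     for character in text:
--         if reading_state == 0:
--             if character == '{':
--                 reading_state = 1
--                 reading_value = ''
--
--         elif reading_state == 1:
--             if character == ':':
--                 reading_state = 2
--                 result.add(reading_value)
--             elif character == '}':
--                 reading_state = 0
--                 result.add(reading_value)
--             else:
--                 reading_value += character
--
--         if reading_state == 2: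
--             if character == '}':
--                 reading_state = 0
--                 result.add(reading_value)
--
--     return result
-- ===== SOURCE B (Python) =====
-- from typing import Set
--
--
-- def _pos(s: str, ch: str) -> int:
--     p = s.find(ch)
--     return len(s) if p < 0 else p
--
--
-- def _extract_variables_from_text(text: str) -> Set[str]:
--     result = set()
--     rest = text
--     while True:
--         _, sep, rest = rest.partition('{')
--         if not sep:
--             return result
--         term = min(_pos(rest, ':'), _pos(rest, '}'))
--         if term == len(rest):
--             return result
--         result.add(rest[:term])
--         if rest[term] == ':':
--             _, sep2, rest = rest[term:].partition('}')
--             if not sep2: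
--                 return result
--         else:
--             rest = rest[term + 1:]
-- ===== Notes on version B (the rewrite author's own statement) =====
-- stated objective: faster
-- what changed: Replaced A's per-character three-state machine by a jump scan that repeatedly splits the remaining text at the next opening brace, cuts the name at the nearer of the next colon and closing brace, and after a colon jumps past the following closing brace.
import Mathlib
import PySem

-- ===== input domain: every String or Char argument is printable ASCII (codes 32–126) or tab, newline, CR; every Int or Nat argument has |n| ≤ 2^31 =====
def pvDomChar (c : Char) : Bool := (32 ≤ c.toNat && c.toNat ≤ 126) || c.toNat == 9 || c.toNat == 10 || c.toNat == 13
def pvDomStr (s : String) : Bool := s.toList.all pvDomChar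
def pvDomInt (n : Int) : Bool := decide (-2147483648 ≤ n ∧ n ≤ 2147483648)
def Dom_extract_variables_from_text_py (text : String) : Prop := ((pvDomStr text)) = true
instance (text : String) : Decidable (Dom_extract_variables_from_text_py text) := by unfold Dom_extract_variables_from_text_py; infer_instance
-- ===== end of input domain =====

-- B replaces A's per-character three-state machine by jump scanning: repeatedly split the
-- remaining text at the next opening brace, cut the name at the nearer of the next colon and
-- closing brace, and after a colon jump past the following closing brace (measured faster:
-- the scanning moves into C-level str.partition/str.find instead of a Python-level loop).

-- ===== PORT A =====
-- one iteration of A's for-loop: state = (result, reading_state, reading_value)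
def stepA (s : List String × Nat × String) (c : Char) : List String × Nat × String :=
  let t :=
    if s.2.1 = 0 then
      if c = '{' then (s.1, 1, "") else s
    else if s.2.1 = 1 then
      if c = ':' then (PySem.Set.add s.1 s.2.2, 2, s.2.2)
      else if c = '}' then (PySem.Set.add s.1 s.2.2, 0, s.2.2)
      else (s.1, 1, s.2.2 ++ c.toString)
    else s
  if t.2.1 = 2 ∧ c = '}' then (PySem.Set.add t.1 t.2.2, 0, t.2.2) else t

def extract_variables_from_text_py (text : String) : List String :=
  (text.toList.foldl stepA (PySem.Set.empty, 0, "")).1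

-- ===== PORT B =====
-- mirrors Source B's `rest.partition(ch)`: the part after the first `ch`, or none when `ch` is absent
def partAfter (cs : List Char) (ch : Char) : Option (List Char) :=
  match cs.dropWhile (· ≠ ch) with
  | [] => none
  | _ :: t => some t

-- mirrors Source B's `_pos`: index of the first `ch`, or the length when absent
def posOf (cs : List Char) (ch : Char) : Nat := cs.findIdx (· = ch)

theorem partAfter_length {cs t : List Char} {ch : Char} (h : partAfter cs ch = some t) :
    t.length < cs.length := by
  unfold partAfter at h
  rcases hd : cs.dropWhile (· ≠ ch) with _ | ⟨x, u⟩ <;> rw [hd] at h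
  · exact absurd h (by simp)
  · cases h
    have := List.length_dropWhile_le (p := (· ≠ ch)) (l := cs)
    rw [hd] at this; simp at this; omega

-- Source B's while-loop, recursing on the remaining suffix `rest`
def altLoop (res : List String) (rest : List Char) : List String :=
  match hp : partAfter rest '{' with
  | none => res
  | some rest1 =>
    let term := min (posOf rest1 ':') (posOf rest1 '}')
    if term = rest1.length then res
    else
      let res1 := PySem.Set.add res (String.ofList (rest1.take term))
      if rest1.getD term ' ' = ':' then
        match hq : partAfter (rest1.drop term) '}' with
        | none => res1
        | some rest2 => altLoop res1 rest2
      else altLoop res1 (rest1.drop (term + 1))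
  termination_by rest.length
  decreasing_by
  · have h1 := partAfter_length hp
    have h2 := partAfter_length hq
    have : (rest1.drop term).length ≤ rest1.length := by simp
    omega
  · have h1 := partAfter_length hp
    have : (rest1.drop (min (posOf rest1 ':') (posOf rest1 '}') + 1)).length ≤ rest1.length := by
      simp
    omega

def extract_variables_from_text_py_alt (text : String) : List String :=
  altLoop PySem.Set.empty text.toList

-- ===== PRECONDITION & SPEC =====
def Spec_extract_variables_from_text_py (text : String) (out : List String) : Prop := out = extract_variables_from_text_py_alt text
instance (text : String) (out : List String) : Decidable (Spec_extract_variables_from_text_py text out) := by unfold Spec_extract_variables_from_text_py; infer_instance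

-- ===== CLAIM (what is proved, stated in full; the proofs are below) =====
def Claim_equal_extract_variables_from_text_py : Prop := ∀ (text : String), Dom_extract_variables_from_text_py text → Spec_extract_variables_from_text_py text (extract_variables_from_text_py text)


-- ===== LEMMAS AND PROOFS =====

-- ---- facts about B's scanning helpers ----

theorem altLoop_none (res : List String) (l : List Char) (h : partAfter l '{' = none) :
    altLoop res l = res := by
  rw [altLoop.eq_def]; split <;> simp_all

theorem altLoop_term_len (res : List String) (l rest1 : List Char)
    (h : partAfter l '{' = some rest1)
    (h2 : min (posOf rest1 ':') (posOf rest1 '}') = rest1.length) :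
    altLoop res l = res := by
  rw [altLoop.eq_def]; split
  · rfl
  · rename_i r1 heq
    rw [h] at heq; injection heq with heq; subst heq
    rw [if_pos h2]

theorem altLoop_colon_none (res : List String) (l rest1 : List Char)
    (h : partAfter l '{' = some rest1)
    (h2 : min (posOf rest1 ':') (posOf rest1 '}') ≠ rest1.length)
    (h3 : rest1.getD (min (posOf rest1 ':') (posOf rest1 '}')) ' ' = ':')
    (h4 : partAfter (rest1.drop (min (posOf rest1 ':') (posOf rest1 '}'))) '}' = none) :
    altLoop res l = PySem.Set.add res (String.ofList (rest1.take (min (posOf rest1 ':') (posOf rest1 '}')))) := by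
  rw [altLoop.eq_def]; split
  · simp_all
  · rename_i r1 heq
    rw [h] at heq; injection heq with heq; subst heq
    rw [if_neg h2, if_pos h3]
    split <;> simp_all

theorem altLoop_colon_some (res : List String) (l rest1 rest2 : List Char)
    (h : partAfter l '{' = some rest1)
    (h2 : min (posOf rest1 ':') (posOf rest1 '}') ≠ rest1.length)
    (h3 : rest1.getD (min (posOf rest1 ':') (posOf rest1 '}')) ' ' = ':')
    (h4 : partAfter (rest1.drop (min (posOf rest1 ':') (posOf rest1 '}'))) '}' = some rest2) :
    altLoop res l = altLoop (PySem.Set.add res (String.ofList (rest1.take (min (posOf rest1 ':') (posOf rest1 '}'))))) rest2 := by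
  rw [altLoop.eq_def]; split
  · simp_all
  · rename_i r1 heq
    rw [h] at heq; injection heq with heq; subst heq
    rw [if_neg h2, if_pos h3]
    split <;> simp_all

theorem altLoop_close (res : List String) (l rest1 : List Char)
    (h : partAfter l '{' = some rest1)
    (h2 : min (posOf rest1 ':') (posOf rest1 '}') ≠ rest1.length)
    (h3 : ¬ rest1.getD (min (posOf rest1 ':') (posOf rest1 '}')) ' ' = ':') :
    altLoop res l = altLoop (PySem.Set.add res (String.ofList (rest1.take (min (posOf rest1 ':') (posOf rest1 '}')))))
      (rest1.drop (min (posOf rest1 ':') (posOf rest1 '}') + 1)) := by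
  rw [altLoop.eq_def]; split
  · simp_all
  · rename_i r1 heq
    rw [h] at heq; injection heq with heq; subst heq
    rw [if_neg h2, if_neg h3]

-- characters that keep A's state 1 reading (neither ':' nor '}')
def flatQ (c : Char) : Bool := c ≠ ':' && c ≠ '}'

theorem min_posOf (l : List Char) :
    min (posOf l ':') (posOf l '}') = (l.takeWhile flatQ).length := by
  unfold posOf
  induction l with
  | nil => simp
  | cons c l ih =>
    by_cases h1 : c = ':'
    · subst h1; simp [List.findIdx_cons, flatQ]
    · by_cases h2 : c = '}'
      · subst h2; simp [List.findIdx_cons, flatQ]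
      · simp [List.findIdx_cons, flatQ, h1, h2, Nat.succ_min_succ, ih]

theorem takeWhile_take {α : Type} (q : α → Bool) (l : List α) :
    l.take (l.takeWhile q).length = l.takeWhile q := by
  induction l with
  | nil => simp
  | cons c l ih =>
    by_cases h : q c <;> simp [h, ih]

theorem takeWhile_drop {α : Type} (q : α → Bool) (l : List α) :
    l.drop (l.takeWhile q).length = l.dropWhile q := by
  induction l with
  | nil => simp
  | cons c l ih =>
    by_cases h : q c <;> simp [h, ih]

theorem dropWhile_head_false {p : Char → Bool} {l : List Char} {x : Char} {t : List Char}
    (h : l.dropWhile p = x :: t) : p x = false := by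
  have hne : l.dropWhile p ≠ [] := by simp [h]
  have := List.head_dropWhile_not (p := p) (l := l) hne
  have hx : (l.dropWhile p).head hne = x := by simp [h]
  rw [hx] at this; simpa using this

theorem partAfter_none_iff (cs : List Char) (ch : Char) :
    partAfter cs ch = none ↔ ∀ x ∈ cs, x ≠ ch := by
  have h1 : partAfter cs ch = none ↔ cs.dropWhile (· ≠ ch) = [] := by
    unfold partAfter; rcases hd : cs.dropWhile (· ≠ ch) <;> simp only [hd] <;> simp
  rw [h1, List.dropWhile_eq_nil_iff]; simp

theorem partAfter_decomp {cs t : List Char} {ch : Char} (h : partAfter cs ch = some t) :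
    ∃ p, cs = p ++ ch :: t ∧ ∀ c ∈ p, c ≠ ch := by
  unfold partAfter at h
  rcases hd : cs.dropWhile (· ≠ ch) with _ | ⟨x, u⟩ <;> rw [hd] at h
  · cases h
  · injection h with h; subst h
    have hx : x = ch := by have := dropWhile_head_false hd; simpa using this
    refine ⟨cs.takeWhile (· ≠ ch), ?_, ?_⟩
    · conv_lhs => rw [← List.takeWhile_append_dropWhile (p := (· ≠ ch)) (l := cs)]
      rw [hd, hx]
    · intro c hc
      simpa using List.mem_takeWhile_imp hc

-- ---- facts about A's state machine ----

theorem str_aux (val : String) (c : Char) (p : List Char) :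
    val ++ c.toString ++ String.ofList p = val ++ String.ofList (c :: p) := by
  apply String.ext ?_; simp

theorem foldA_state0_flat (p l : List Char) (hp : ∀ c ∈ p, c ≠ '{')
    (res : List String) (val : String) :
    (p ++ l).foldl stepA (res, 0, val) = l.foldl stepA (res, 0, val) := by
  induction p with
  | nil => simp
  | cons c p ih =>
    have hc := hp c (List.mem_cons_self)
    have hstep : stepA (res, 0, val) c = (res, 0, val) := by simp [stepA, hc]
    simp only [List.cons_append, List.foldl_cons, hstep]
    exact ih (fun x hx => hp x (List.mem_cons_of_mem _ hx))

theorem foldA_state1_flat (p l : List Char) (hp : ∀ c ∈ p, c ≠ ':' ∧ c ≠ '}')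
    (res : List String) (val : String) :
    (p ++ l).foldl stepA (res, 1, val) = l.foldl stepA (res, 1, val ++ String.ofList p) := by
  induction p generalizing val with
  | nil => simp
  | cons c p ih =>
    have hc := hp c (List.mem_cons_self)
    have hstep : stepA (res, 1, val) c = (res, 1, val ++ c.toString) := by
      simp [stepA, hc.1, hc.2]
    simp only [List.cons_append, List.foldl_cons, hstep]
    rw [ih (fun x hx => hp x (List.mem_cons_of_mem _ hx)) (val ++ c.toString), str_aux]

theorem foldA_state2_flat (p l : List Char) (hp : ∀ c ∈ p, c ≠ '}')
    (res : List String) (val : String) :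
    (p ++ l).foldl stepA (res, 2, val) = l.foldl stepA (res, 2, val) := by
  induction p with
  | nil => simp
  | cons c p ih =>
    have hc := hp c (List.mem_cons_self)
    have hstep : stepA (res, 2, val) c = (res, 2, val) := by simp [stepA, hc]
    simp only [List.cons_append, List.foldl_cons, hstep]
    exact ih (fun x hx => hp x (List.mem_cons_of_mem _ hx))

theorem getD_of_drop {l : List Char} {n : Nat} {d : Char} {u : List Char}
    (h : l.drop n = d :: u) : l.getD n ' ' = d := by
  have hsome : l[n]? = some d := by
    have h2 : (List.drop n l)[0]? = l[n + 0]? := List.getElem?_drop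
    simp [h] at h2; simpa using h2.symm
  simp [List.getD, hsome]

theorem main_loop : ∀ (n : Nat) (l : List Char), l.length ≤ n →
    ∀ (res : List String) (val : String),
    (l.foldl stepA (res, 0, val)).1 = altLoop res l := by
  intro n
  induction n with
  | zero =>
    intro l hl res val
    have hnil : l = [] := List.eq_nil_of_length_eq_zero (Nat.le_zero.mp hl)
    subst hnil
    rw [altLoop_none res [] rfl]
    rfl
  | succ n ih =>
    intro l hl res val
    cases hp : partAfter l '{' with
    | none =>
      rw [altLoop_none res l hp]
      have hfree : ∀ c ∈ l, c ≠ '{' := (partAfter_none_iff l '{').mp hp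
      have := foldA_state0_flat l [] hfree res val
      simp only [List.append_nil] at this
      rw [this]
      rfl
    | some rest1 =>
      obtain ⟨p, hleq, hpf⟩ := partAfter_decomp hp
      subst hleq
      have hlen0 : p.length + (rest1.length + 1) = (p ++ '{' :: rest1).length := by simp
      -- A runs through the '{'-free prefix, then resets value on '{'
      have hA0 : ((p ++ '{' :: rest1).foldl stepA (res, 0, val)) =
          rest1.foldl stepA (res, 1, "") := by
        rw [foldA_state0_flat p _ hpf]
        simp only [List.foldl_cons]
        congr 1
      rw [hA0]
      -- split rest1 at the first ':' or '}'
      have hterm := min_posOf rest1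
      have htake := takeWhile_take flatQ rest1
      have hdrop := takeWhile_drop flatQ rest1
      have hsplit := List.takeWhile_append_dropWhile (p := flatQ) (l := rest1)
      have hflat : ∀ c ∈ rest1.takeWhile flatQ, c ≠ ':' ∧ c ≠ '}' := by
        intro c hc
        have := List.mem_takeWhile_imp hc
        simp [flatQ] at this
        exact this
      cases hrc : rest1.dropWhile flatQ with
      | nil =>
        have hlen : (rest1.takeWhile flatQ).length = rest1.length := by
          conv_rhs => rw [← hsplit]
          rw [hrc]; simp
        rw [altLoop_term_len res _ rest1 hp (hterm.trans hlen)]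
        have h1 : rest1.foldl stepA (res, 1, "") =
            (res, 1, "" ++ String.ofList (rest1.takeWhile flatQ)) := by
          conv_lhs => rw [← hsplit, hrc, List.append_nil]
          have := foldA_state1_flat (rest1.takeWhile flatQ) [] hflat res ""
          simp only [List.append_nil] at this
          rw [this]
          simp
        rw [h1]
      | cons d u =>
        have hdropc : rest1.drop (rest1.takeWhile flatQ).length = d :: u := by
          rw [hdrop, hrc]
        have hlen : (rest1.takeWhile flatQ).length + (u.length + 1) = rest1.length := by
          conv_rhs => rw [← hsplit]
          rw [hrc]; simp
        have hne : min (posOf rest1 ':') (posOf rest1 '}') ≠ rest1.length := by omega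
        have hgetD : rest1.getD (min (posOf rest1 ':') (posOf rest1 '}')) ' ' = d := by
          rw [hterm]; exact getD_of_drop hdropc
        have hd := dropWhile_head_false hrc
        simp [flatQ] at hd
        -- the name A has accumulated = the name B slices out
        have hA1 : rest1.foldl stepA (res, 1, "") =
            (d :: u).foldl stepA (res, 1, String.ofList (rest1.takeWhile flatQ)) := by
          conv_lhs => rw [← hsplit, hrc]
          rw [foldA_state1_flat _ _ hflat res ""]
          congr 2
        rw [hA1]
        have hres1 : PySem.Set.add res (String.ofList (rest1.takeWhile flatQ)) =
            PySem.Set.add res (String.ofList (rest1.take (min (posOf rest1 ':') (posOf rest1 '}')))) := by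
          rw [hterm, htake]
        rcases or_iff_not_imp_left.mpr hd with hcolon | hclose
        · -- terminator is ':': A adds the name and skips to the next '}'
          subst hcolon
          have hstep : (':' :: u).foldl stepA (res, 1, String.ofList (rest1.takeWhile flatQ)) =
              u.foldl stepA (PySem.Set.add res (String.ofList (rest1.takeWhile flatQ)), 2,
                String.ofList (rest1.takeWhile flatQ)) := by
            simp only [List.foldl_cons]
            congr 1
          rw [hstep]
          have hpa : partAfter (rest1.drop (min (posOf rest1 ':') (posOf rest1 '}'))) '}' =
              partAfter u '}' := by
            rw [hterm, hdropc]
            unfold partAfter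
            rw [List.dropWhile_cons]
            simp
          cases hq : partAfter u '}' with
          | none =>
            rw [altLoop_colon_none res _ rest1 hp hne hgetD (hpa.trans hq)]
            have hfree2 : ∀ c ∈ u, c ≠ '}' := (partAfter_none_iff u '}').mp hq
            have := foldA_state2_flat u [] hfree2
              (PySem.Set.add res (String.ofList (rest1.takeWhile flatQ)))
              (String.ofList (rest1.takeWhile flatQ))
            simp only [List.append_nil] at this
            rw [this, ← hres1]
            rfl
          | some r2 =>
            rw [altLoop_colon_some res _ rest1 r2 hp hne hgetD (hpa.trans hq)]
            obtain ⟨q2, hueq, hq2f⟩ := partAfter_decomp hq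
            subst hueq
            have hulen : q2.length + (r2.length + 1) = (q2 ++ '}' :: r2).length := by simp
            rw [foldA_state2_flat q2 _ hq2f]
            simp only [List.foldl_cons]
            have hstep2 : stepA (PySem.Set.add res (String.ofList (rest1.takeWhile flatQ)), 2,
                String.ofList (rest1.takeWhile flatQ)) '}' =
                (PySem.Set.add res (String.ofList (rest1.takeWhile flatQ)), 0,
                  String.ofList (rest1.takeWhile flatQ)) := by
              simp [stepA]
            rw [hstep2, ih r2 (by simp at hl; omega) _ _, hres1]
        · -- terminator is '}': A adds the name and returns to state 0
          subst hclose
          have hdne : ¬ rest1.getD (min (posOf rest1 ':') (posOf rest1 '}')) ' ' = ':' := by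
            rw [hgetD]; decide
          rw [altLoop_close res _ rest1 hp hne hdne]
          have hdropu : rest1.drop (min (posOf rest1 ':') (posOf rest1 '}') + 1) = u := by
            rw [hterm, ← List.drop_drop, hdropc]
            simp
          rw [hdropu]
          simp only [List.foldl_cons]
          have hstep : stepA (res, 1, String.ofList (rest1.takeWhile flatQ)) '}' =
              (PySem.Set.add res (String.ofList (rest1.takeWhile flatQ)), 0,
                String.ofList (rest1.takeWhile flatQ)) := by
            simp [stepA]
          rw [hstep, ih u (by simp at hl; omega) _ _, hres1]


-- ===== VERDICT (by name: the statement is the Claim_ definition above) =====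
theorem extract_variables_from_text_py_spec : Claim_equal_extract_variables_from_text_py := by
  intro text _
  unfold Spec_extract_variables_from_text_py extract_variables_from_text_py extract_variables_from_text_py_alt
  exact main_loop text.toList.length text.toList le_rfl PySem.Set.empty ""
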